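-- pv_equiv track=rewrite | github.com/bacnxptit/codePtitDSA | 2_DSA01001.py | sinhXauNhiPhan
-- ===== SOURCE A (Python) =====
-- def sinhXauNhiPhan(s):
--     a = list(s)
--     n = len(a)
--     for i in range(n - 1, -1, -1):
--         if a[i] == '0':
--             a[i] = '1'
--             for j in range(i + 1, n):
--                 a[j] = '0'
--             return ''.join(a)
--     return '0' * n
-- ===== SOURCE B (Python) =====
-- def sinhXauNhiPhan(s):
--     # Single forward pass with an accumulator: maintain the committed prefix
--     # (everything up to and excluding the most recent '0') and the run of
--     # characters seen since that '0'; assemble the answer at the end.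
--     before = []
--     seen = False
--     after = []
--     for c in s:
--         if c == '0':
--             if seen:
--                 before.append('0')
--             before.extend(after)
--             after = []
--             seen = True
--         else:
--             after.append(c)
--     if seen:
--         return ''.join(before) + '1' + '0' * len(after)
--     return '0' * len(s)
-- ===== Notes on version B (the rewrite author's own statement) =====
-- stated objective: alternative
-- what changed: A scans indices right-to-left over a mutable char list and zeroes the suffix with an inner index loop; B makes a single left-to-right pass with an accumulator (committed prefix, seen flag, run since the last '0') and assembles the result once at the end, with no backward scan and no index arithmetic.
import Mathlib
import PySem

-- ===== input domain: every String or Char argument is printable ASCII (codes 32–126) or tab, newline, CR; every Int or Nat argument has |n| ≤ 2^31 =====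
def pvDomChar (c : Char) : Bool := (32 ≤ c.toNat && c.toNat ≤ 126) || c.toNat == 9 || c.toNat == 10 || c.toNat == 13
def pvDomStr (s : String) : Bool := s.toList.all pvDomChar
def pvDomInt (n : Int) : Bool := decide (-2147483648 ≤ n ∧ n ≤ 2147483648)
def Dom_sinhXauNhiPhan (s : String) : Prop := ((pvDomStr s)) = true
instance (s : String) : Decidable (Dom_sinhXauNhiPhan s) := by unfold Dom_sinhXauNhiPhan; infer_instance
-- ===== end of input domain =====

-- B replaces A's backward index scan over a mutable char list (with an inner
-- suffix-zeroing loop) by a single forward pass with an accumulator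
-- (committed prefix / run since the last '0'), assembled once at the end
-- (objective: alternative decomposition, same O(n) cost).

-- ===== PORT A =====
-- the 'for i in range(n-1, -1, -1)' loop with its early return; a is the char list, n = len(a)
def pvLoopA (n : Int) (a : List Char) (idxs : List Int) : String :=
  match idxs with
  | [] => String.ofList (List.replicate n.toNat '0')   -- return '0' * n
  | i :: rest =>
    if PySem.List.pyGetD a i ' ' = '0' then            -- if a[i] == '0'
      -- a[i] = '1'; for j in range(i+1, n): a[j] = '0'; return ''.join(a)
      String.ofList ((PySem.List.pyRange (i + 1) n 1).foldl
        (fun acc j => PySem.List.pySetD acc j '0') (PySem.List.pySetD a i '1'))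
    else pvLoopA n a rest

def sinhXauNhiPhan (s : String) : String :=
  let a := s.toList
  let n : Int := a.length
  pvLoopA n a (PySem.List.pyRange (n - 1) (-1) (-1))

-- ===== PORT B =====
-- one step of Source B's 'for c in s' loop; state = (before, seen, after)
def pvStepB (st : List Char × Bool × List Char) (c : Char) : List Char × Bool × List Char :=
  if c = '0' then
    ((st.1 ++ (if st.2.1 then ['0'] else [])) ++ st.2.2, true, [])
  else (st.1, st.2.1, st.2.2 ++ [c])

def sinhXauNhiPhan_alt (s : String) : String :=
  let st := s.toList.foldl pvStepB ([], false, [])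
  if st.2.1 then
    String.ofList (st.1 ++ '1' :: List.replicate st.2.2.length '0')   -- ''.join(before) + '1' + '0'*len(after)
  else String.ofList (List.replicate s.toList.length '0')             -- '0' * len(s)

-- ===== PRECONDITION & SPEC =====
def Spec_sinhXauNhiPhan (s : String) (out : String) : Prop := out = sinhXauNhiPhan_alt s
instance (s : String) (out : String) : Decidable (Spec_sinhXauNhiPhan s out) := by unfold Spec_sinhXauNhiPhan; infer_instance

-- ===== CLAIM (what is proved, stated in full; the proofs are below) =====
def Claim_equal_sinhXauNhiPhan : Prop := ∀ (s : String), Dom_sinhXauNhiPhan s → Spec_sinhXauNhiPhan s (sinhXauNhiPhan s)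

-- ===== LEMMAS AND PROOFS =====

-- common specification: on the REVERSED list, zero out leading chars until the first '0', which becomes '1'
def pvCarry : List Char → List Char
  | [] => []
  | c :: rest => if c = '0' then '1' :: rest else '0' :: pvCarry rest

def pvSpecL (l : List Char) : List Char := (pvCarry l.reverse).reverse

-- chars strictly before / strictly after the last '0' (pvPost l = l when no '0')
def pvPre (l : List Char) : List Char := ((l.reverse.dropWhile (· ≠ '0')).tail).reverse
def pvPost (l : List Char) : List Char := (l.reverse.takeWhile (· ≠ '0')).reverse

lemma pvCarry_no_zero (l : List Char) (h : '0' ∉ l) :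
    pvCarry l = List.replicate l.length '0' := by
  induction l with
  | nil => rfl
  | cons c rest ih =>
    simp only [List.mem_cons, not_or] at h
    simp [pvCarry, Ne.symm h.1, ih h.2, List.replicate_succ]

lemma pvCarry_split (pre rest : List Char) (h : '0' ∉ pre) :
    pvCarry (pre ++ '0' :: rest) = List.replicate pre.length '0' ++ '1' :: rest := by
  induction pre with
  | nil => simp [pvCarry]
  | cons c t ih =>
    simp only [List.mem_cons, not_or] at h
    simp [pvCarry, Ne.symm h.1, ih h.2, List.replicate_succ]

lemma pvSpecL_append_singleton (xs : List Char) (c : Char) :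
    pvSpecL (xs ++ [c]) = if c = '0' then xs ++ ['1'] else pvSpecL xs ++ ['0'] := by
  simp only [pvSpecL, List.reverse_append, List.reverse_cons, List.reverse_nil, List.nil_append,
    List.singleton_append, pvCarry]
  split <;> simp

lemma pv_take_set_succ (b : List Char) (k : Nat) (c : Char) (h : k < b.length) :
    (b.set k c).take (k + 1) = b.take k ++ [c] := by
  rw [List.take_add_one, List.getElem?_set_self (by simpa using h)]
  simp [List.take_set]
  exact List.set_eq_of_length_le (by simp)

lemma pv_foldl_setzero (b : List Char) (k : Nat) (hk : k ≤ b.length) :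
    (PySem.List.pyRange (k : Int) (b.length : Int) 1).foldl
      (fun acc j => PySem.List.pySetD acc j '0') b
    = b.take k ++ List.replicate (b.length - k) '0' := by
  induction hd : b.length - k generalizing b k with
  | zero =>
    have : (b.length : Int) ≤ (k : Int) := by omega
    rw [PySem.List.pyRange_one_eq_nil this]
    have : k = b.length := by omega
    simp [this]
  | succ d ih =>
    have hlt : (k : Int) < (b.length : Int) := by omega
    rw [PySem.List.pyRange_one_cons hlt]
    simp only [List.foldl_cons, PySem.List.pySetD_natCast]
    have hk' : k < b.length := by omega
    have hlen : (b.set k '0').length = b.length := by simp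
    have : ((k : Int) + 1) = ((k + 1 : Nat) : Int) := by push_cast; ring
    rw [this, ← hlen, ih (b.set k '0') (k + 1) (by omega) (by omega)]
    rw [pv_take_set_succ b k '0' hk']
    simp [List.replicate_succ]

lemma pvLoopA_spec (a : List Char) (m : Nat) (hm : m ≤ a.length) :
    pvLoopA (a.length : Int) a (PySem.List.pyRange ((m : Int) - 1) (-1) (-1))
    = String.ofList (pvSpecL (a.take m) ++ List.replicate (a.length - m) '0') := by
  induction m with
  | zero =>
    rw [PySem.List.pyRange_neg_one_eq_nil (by omega)]
    simp [pvLoopA, pvSpecL, pvCarry]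
  | succ m ih =>
    rw [show ((m + 1 : Nat) : Int) - 1 = (m : Int) by push_cast; ring,
        PySem.List.pyRange_neg_one_cons (by omega : (-1 : Int) < (m : Int))]
    simp only [pvLoopA, PySem.List.pyGetD_natCast]
    have hm' : m < a.length := by omega
    have hget : a.getD m ' ' = a[m] := by
      simp [List.getD, List.getElem?_eq_getElem hm']
    have htake : a.take (m + 1) = a.take m ++ [a[m]] := by
      rw [List.take_add_one, List.getElem?_eq_getElem hm']; rfl
    by_cases h0 : a[m] = '0'
    · rw [if_pos (by rw [hget]; exact h0)]
      simp only [PySem.List.pySetD_natCast]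
      have hlen : (a.set m '1').length = a.length := by simp
      rw [show ((m : Int) + 1) = ((m + 1 : Nat) : Int) by push_cast; ring,
        ← hlen, pv_foldl_setzero _ (m + 1) (by omega), hlen, pv_take_set_succ a m '1' hm',
        htake, pvSpecL_append_singleton, if_pos h0]
    · rw [if_neg (by rw [hget]; exact h0), ih (by omega)]
      rw [htake, pvSpecL_append_singleton, if_neg h0]
      have : a.length - m = (a.length - (m + 1)) + 1 := by omega
      simp [this, List.replicate_succ]

lemma pv_A_eq_spec (s : String) :
    sinhXauNhiPhan s = String.ofList (pvSpecL s.toList) := by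
  show pvLoopA ((s.toList.length : Int)) s.toList
      (PySem.List.pyRange ((s.toList.length : Int) - 1) (-1) (-1)) = _
  rw [pvLoopA_spec s.toList s.toList.length (le_refl _), List.take_length, Nat.sub_self]
  simp

-- pvPre/pvPost snoc facts
lemma pvPost_snoc_zero (l : List Char) : pvPost (l ++ ['0']) = [] := by
  simp [pvPost]

lemma pvPost_snoc_ne (l : List Char) (c : Char) (hc : c ≠ '0') :
    pvPost (l ++ [c]) = pvPost l ++ [c] := by
  simp [pvPost, hc]

lemma pvPre_snoc_zero (l : List Char) : pvPre (l ++ ['0']) = l := by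
  simp [pvPre]

lemma pvPre_snoc_ne (l : List Char) (c : Char) (hc : c ≠ '0') :
    pvPre (l ++ [c]) = pvPre l := by
  simp [pvPre, hc]

lemma pv_no_zero_post (l : List Char) : '0' ∉ pvPost l := by
  intro h
  rw [pvPost, List.mem_reverse] at h
  have := List.mem_takeWhile_imp h
  simp at this

lemma pv_pre_post (l : List Char) (h : '0' ∈ l) :
    pvPre l ++ '0' :: pvPost l = l := by
  induction l using List.reverseRecOn with
  | nil => simp at h
  | append_singleton l c ih =>
    by_cases hc : c = '0'
    · subst hc
      rw [pvPre_snoc_zero, pvPost_snoc_zero]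
    · have hl : '0' ∈ l := by
        rcases List.mem_append.mp h with h' | h'
        · exact h'
        · simp at h'; exact absurd h'.symm hc
      rw [pvPre_snoc_ne l c hc, pvPost_snoc_ne l c hc]
      rw [show pvPre l ++ '0' :: (pvPost l ++ [c]) = (pvPre l ++ '0' :: pvPost l) ++ [c] by simp]
      rw [ih hl]

lemma pvB_fold (l : List Char) :
    l.foldl pvStepB ([], false, []) =
      if '0' ∈ l then (pvPre l, true, pvPost l) else ([], false, l) := by
  induction l using List.reverseRecOn with
  | nil => simp
  | append_singleton l c ih =>
    rw [List.foldl_append, List.foldl_cons, List.foldl_nil, ih]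
    by_cases hc : c = '0'
    · subst hc
      by_cases hl : '0' ∈ l
      · rw [if_pos hl]
        simp only [pvStepB]
        rw [if_pos (by simp), pvPre_snoc_zero, pvPost_snoc_zero]
        simp [pv_pre_post l hl]
      · rw [if_neg hl]
        simp only [pvStepB]
        rw [if_pos (by simp), pvPre_snoc_zero, pvPost_snoc_zero]
        simp
    · by_cases hl : '0' ∈ l
      · rw [if_pos hl]
        simp only [pvStepB, if_neg hc]
        rw [if_pos (by simp [hl]), pvPre_snoc_ne l c hc, pvPost_snoc_ne l c hc]
      · rw [if_neg hl]
        simp only [pvStepB, if_neg hc]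
        rw [if_neg (by simp [hl, Ne.symm hc])]

lemma pv_B_eq_spec (s : String) :
    sinhXauNhiPhan_alt s = String.ofList (pvSpecL s.toList) := by
  unfold sinhXauNhiPhan_alt
  rw [pvB_fold s.toList]
  by_cases h : '0' ∈ s.toList
  · rw [if_pos h]
    have hdec := pv_pre_post s.toList h
    have hrev : s.toList.reverse = (pvPost s.toList).reverse ++ '0' :: (pvPre s.toList).reverse := by
      conv_lhs => rw [← hdec]
      simp
    have hspec : pvSpecL s.toList
        = pvPre s.toList ++ '1' :: List.replicate (pvPost s.toList).length '0' := by
      rw [pvSpecL, hrev, pvCarry_split _ _ (by simpa using pv_no_zero_post s.toList)]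
      simp [List.reverse_replicate]
    simp [hspec]
  · rw [if_neg h]
    have hspec : pvSpecL s.toList = List.replicate s.toList.length '0' := by
      rw [pvSpecL, pvCarry_no_zero _ (by simpa using h)]
      simp [List.reverse_replicate]
    simp [hspec]

-- ===== VERDICT (by name: the statement is the Claim_ definition above) =====
theorem sinhXauNhiPhan_spec : Claim_equal_sinhXauNhiPhan := by
  intro s _
  show sinhXauNhiPhan s = sinhXauNhiPhan_alt s
  rw [pv_A_eq_spec, pv_B_eq_spec]
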